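-- pv_equiv track=rewrite | github.com/Anthony-Kolenic/advent-of-code | 2024/04/main.py | diagonal_search
-- ===== SOURCE A (Python) =====
-- def diagonal_search(grid, search = "XMAS") -> list[tuple[int, int]]:
--     search_rev = search[::-1]
--     result = []
--     for r in range(len(grid)):
--         for c in range(len(grid[r])):
--             try:
--                 word = ""
--                 for i in range(len(search)):
--                     word += grid[r + i][c + i]
--                 if word == search or word == search_rev:
--                     result.append((r, c))
--             except:
--                 # Except when out of bounds, so we skip these
--                 continue
--     return result
-- ===== SOURCE B (Python) =====
-- def diagonal_search(grid, search="XMAS") -> list[tuple[int, int]]: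
--     # Extract each diagonal once (as maximal contiguous runs, so ragged grids work),
--     # scan every position of a run with one slice comparison against the pattern and
--     # its reverse, and bucket the hits by row.  Within a row the diagonals are visited
--     # in increasing column order, so concatenating the buckets row by row reproduces
--     # the row-major order of the naive scan without any sort.
--     rev = search[::-1]
--     L = len(search)
--     R = len(grid)
--     maxw = 0
--     for row in grid:
--         if len(row) > maxw:
--             maxw = len(row)
--     rows = [[] for _ in range(R)]
--     for d in range(1 - R, maxw):
--         r = -d if d < 0 else 0          # first row whose diagonal cell has c >= 0
--         hi = maxw - d                   # rows from here on have c >= maxw >= len(grid[r])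
--         if R < hi:
--             hi = R
--         while r < hi:
--             if 0 <= r + d < len(grid[r]):
--                 r0 = r
--                 chars = []
--                 while r < R and 0 <= r + d < len(grid[r]):
--                     chars.append(grid[r][r + d])
--                     r += 1
--                 s = "".join(chars)
--                 for j in range(len(s)):
--                     w = s[j:j + L]
--                     if w == search or w == rev:
--                         rows[r0 + j].append(r0 + j + d)
--             else:
--                 r += 1
--     return [(r, c) for r in range(R) for c in rows[r]]
-- ===== Notes on version B (the rewrite author's own statement) =====
-- stated objective: faster
-- what changed: Instead of re-walking the diagonal with try/except from every cell, B extracts each diagonal once as maximal contiguous runs (row range clamped to the diagonal's feasible window), checks every run position with a single C-level slice comparison against the pattern and its reverse, and buckets hits by row (diagonals are visited in increasing column order per row), reassembling the row-major result without a sort.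
import Mathlib
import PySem

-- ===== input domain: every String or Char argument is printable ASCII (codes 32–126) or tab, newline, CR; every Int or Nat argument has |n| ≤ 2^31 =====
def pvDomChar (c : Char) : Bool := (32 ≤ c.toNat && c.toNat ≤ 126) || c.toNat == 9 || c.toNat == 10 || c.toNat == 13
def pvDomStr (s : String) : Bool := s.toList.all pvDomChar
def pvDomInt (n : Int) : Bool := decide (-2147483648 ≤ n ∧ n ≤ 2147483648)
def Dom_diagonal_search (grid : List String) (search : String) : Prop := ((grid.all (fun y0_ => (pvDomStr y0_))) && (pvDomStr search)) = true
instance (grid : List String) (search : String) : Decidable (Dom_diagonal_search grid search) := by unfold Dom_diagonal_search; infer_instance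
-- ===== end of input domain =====

-- B extracts each diagonal once as maximal contiguous runs and scans each run with slice
-- comparisons, bucketing hits by row, instead of A's per-cell try/except re-walk (objective:
-- alternative algorithm, same results).

-- ===== PORT A =====
-- word is kept as List Char (Python builds a str by concatenating 1-char strings; exact on chars).
def diagonal_search (grid : List String) (search : String) : List (Int × Int) :=
  let search_rev := (PySem.Str.slice? search none none (-1)).getD ""   -- search[::-1]; step ≠ 0, never raises
  (PySem.List.pyRange 0 (grid.length : Int) 1).foldl (fun result r =>
    let row := PySem.List.pyGetD grid r ""   -- grid[r], r in range
    (PySem.List.pyRange 0 (row.length : Int) 1).foldl (fun result c =>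
      -- try: build word char by char; any IndexError aborts the cell (none)
      let word? := (PySem.List.pyRange 0 (search.length : Int) 1).foldl
        (fun (w? : Option (List Char)) i =>
          w?.bind (fun w => (PySem.List.pyGet? grid (r + i)).bind
            (fun rowi => (PySem.Str.pyGet? rowi (c + i)).map (fun ch => w ++ [ch]))))
        (some [])
      match word? with
      | some w => if w = search.toList ∨ w = search_rev.toList then result ++ [(r, c)] else result
      | none => result) result) []

-- ===== PORT B =====
-- 0 <= c < len(grid[r]) for the diagonal cell at row r of diagonal d (c = r + d);
-- false whenever r is out of range (grid.getD gives the empty row).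
def bValid (grid : List String) (d : Int) (r : Nat) : Bool :=
  decide (0 ≤ (r : Int) + d) && decide ((r : Int) + d < ((grid.getD r "").length : Int))

-- grid[r][r+d] (only used on valid cells)
def bChar (grid : List String) (d : Int) (r : Nat) : Char :=
  (grid.getD r "").toList.getD ((r : Int) + d).toNat ' '

-- length of the maximal contiguous run of valid diagonal cells starting at row r
-- (the inner `while r < R and 0 <= r + d < len(grid[r])` collector)
def bSeglen (grid : List String) (d : Int) (r : Nat) : Nat :=
  ((List.range (grid.length - r)).takeWhile (fun k => bValid grid d (r + k))).length

-- `for j in range(len(s)): if s[j:j+L] in {search, rev}: rows[r0+j].append(r0+j+d)`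
def bScan (pat rev : List Char) (L : Nat) (d : Int) (r0 : Nat) (s : List Char)
    (rows : List (List Int)) : List (List Int) :=
  (List.range s.length).foldl (fun rows (j : Nat) =>
    let w := PySem.Chars.slice s (some (j : Int)) (some ((j : Int) + (L : Int)))
    if w = pat ∨ w = rev then rows.set (r0 + j) ((rows.getD (r0 + j) []) ++ [(r0 : Int) + (j : Int) + d])
    else rows) rows

theorem bValid_of_ge (grid : List String) (d : Int) (t : Nat) (h : grid.length ≤ t) :
    bValid grid d t = false := by
  unfold bValid
  rw [List.getD_eq_default _ _ h]
  simp only [Bool.and_eq_false_iff, decide_eq_false_iff_not]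
  by_cases h0 : (0 : Int) ≤ (t : Int) + d
  · right; simp; omega
  · left; exact h0

theorem lt_of_bValid (grid : List String) (d : Int) (t : Nat) (h : bValid grid d t = true) :
    t < grid.length := by
  by_contra hge
  rw [bValid_of_ge grid d t (by omega)] at h
  exact absurd h (by simp)

theorem bSeglen_pos (grid : List String) (d : Int) (r : Nat) (h : r < grid.length)
    (hv : bValid grid d r = true) : 0 < bSeglen grid d r := by
  unfold bSeglen
  have h0 : 0 < grid.length - r := by omega
  obtain ⟨n, hn⟩ : ∃ n, grid.length - r = n + 1 := ⟨grid.length - r - 1, by omega⟩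
  simp [hn, List.range_succ_eq_map, hv]

-- the outer `while r < hi` walk over one diagonal (hi = min(R, maxw - d))
def bWalk (grid : List String) (pat rev : List Char) (L : Nat) (d : Int) (hi r : Nat)
    (rows : List (List Int)) : List (List Int) :=
  if h : r < hi then
    if hv : bValid grid d r then
      let m := bSeglen grid d r
      let s := (List.range m).map (fun k => bChar grid d (r + k))
      bWalk grid pat rev L d hi (r + m) (bScan pat rev L d r s rows)
    else bWalk grid pat rev L d hi (r + 1) rows
  else rows
termination_by hi - r
decreasing_by
  · have := bSeglen_pos grid d r (lt_of_bValid grid d r hv) hv; omega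
  · omega

def diagonal_search_alt (grid : List String) (search : String) : List (Int × Int) :=
  let rev := (PySem.Str.slice? search none none (-1)).getD ""   -- search[::-1]
  let L := search.length
  let R := grid.length
  let maxw := grid.foldl (fun m row => if row.length > m then row.length else m) 0
  let rows := (PySem.List.pyRange (1 - (R : Int)) (maxw : Int) 1).foldl
    (fun rows d =>
      let r := if d < 0 then (-d).toNat else 0
      let hi := min R ((maxw : Int) - d).toNat
      bWalk grid search.toList rev.toList L d hi r rows)
    (List.replicate R [])
  (List.range R).flatMap (fun r => (rows.getD r []).map (fun c => ((r : Int), c)))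

-- ===== PRECONDITION & SPEC =====
def Spec_diagonal_search (grid : List String) (search : String) (out : List (Int × Int)) : Prop := out = diagonal_search_alt grid search
instance (grid : List String) (search : String) (out : List (Int × Int)) : Decidable (Spec_diagonal_search grid search out) := by unfold Spec_diagonal_search; infer_instance

-- ===== CLAIM (what is proved, stated in full; the proofs are below) =====
def Claim_equal_diagonal_search : Prop := ∀ (grid : List String) (search : String), Dom_diagonal_search grid search → Spec_diagonal_search grid search (diagonal_search grid search)

-- ===== LEMMAS AND PROOFS =====

-- the diagonal cell at (r, c); none iff missing
def cell? (grid : List String) (r c : Int) : Option Char :=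
  (PySem.List.pyGet? grid r).bind (fun row => PySem.Str.pyGet? row c)

-- the diagonal word of length n read from cell (r, c); none iff some cell is missing

def wordN (grid : List String) (n : Nat) (r c : Int) : Option (List Char) :=
  match n with
  | 0 => some []
  | n + 1 => (cell? grid r c).bind (fun ch =>
      (wordN grid n (r + 1) (c + 1)).map (ch :: ·))

-- A's per-cell test, stated once for both sides
def Pm (grid : List String) (pat rev : List Char) (L : Nat) (r c : Int) : Bool :=
  match wordN grid L r c with
  | some w => decide (w = pat ∨ w = rev)
  | none => false


theorem wordA_eq (grid : List String) (L : Nat) (r c : Int) (w0 : List Char) :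
    (List.range L).foldl
      (fun (w? : Option (List Char)) (k : Nat) =>
        w?.bind (fun w => (PySem.List.pyGet? grid (r + (k : Int))).bind
          (fun rowi => (PySem.Str.pyGet? rowi (c + (k : Int))).map (fun ch => w ++ [ch]))))
      (some w0)
    = (wordN grid L r c).map (w0 ++ ·) := by
  induction L generalizing r c w0 with
  | zero => simp [wordN]
  | succ n ih =>
    rw [List.range_succ_eq_map]
    simp only [List.foldl_cons, List.foldl_map]
    have hcong : ∀ (acc : Option (List Char)), ∀ x ∈ List.range n,
        (fun (w? : Option (List Char)) (k : Nat) =>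
          w?.bind (fun w => (PySem.List.pyGet? grid (r + ((k.succ : Nat) : Int))).bind
            (fun rowi => (PySem.Str.pyGet? rowi (c + ((k.succ : Nat) : Int))).map (fun ch => w ++ [ch])))) acc x
        = (fun (w? : Option (List Char)) (k : Nat) =>
          w?.bind (fun w => (PySem.List.pyGet? grid ((r + 1) + (k : Int))).bind
            (fun rowi => (PySem.Str.pyGet? rowi ((c + 1) + (k : Int))).map (fun ch => w ++ [ch])))) acc x := by
      intro acc x _
      have h1 : r + ((x.succ : Nat) : Int) = (r + 1) + (x : Int) := by push_cast; ring
      have h2 : c + ((x.succ : Nat) : Int) = (c + 1) + (x : Int) := by push_cast; ring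
      simp only [h1, h2]
    rcases hc : cell? grid r c with _ | ch
    · have h0 : (some w0).bind (fun w => (PySem.List.pyGet? grid (r + ((0 : Nat) : Int))).bind
          (fun rowi => (PySem.Str.pyGet? rowi (c + ((0 : Nat) : Int))).map (fun ch => w ++ [ch]))) = none := by
        simpa [cell?, Option.bind_eq_none_iff, Option.map_eq_none_iff] using hc
      rw [h0]
      have hnone : ∀ (l : List Nat),
          l.foldl (fun (w? : Option (List Char)) (k : Nat) =>
            w?.bind (fun w => (PySem.List.pyGet? grid (r + ((k.succ : Nat) : Int))).bind
              (fun rowi => (PySem.Str.pyGet? rowi (c + ((k.succ : Nat) : Int))).map (fun ch => w ++ [ch]))))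
            none = none := by
        intro l; induction l with
        | nil => rfl
        | cons y ys ihy => simpa using ihy
      rw [hnone (List.range n), wordN, hc]
      rfl
    · have h0 : (some w0).bind (fun w => (PySem.List.pyGet? grid (r + ((0 : Nat) : Int))).bind
          (fun rowi => (PySem.Str.pyGet? rowi (c + ((0 : Nat) : Int))).map (fun ch => w ++ [ch]))) = some (w0 ++ [ch]) := by
        unfold cell? at hc
        rw [Option.bind_eq_some_iff] at hc
        obtain ⟨row, hg, hs⟩ := hc
        have hs' : PySem.List.pyGet? row.toList c = some ch := by simpa using hs
        simp [hg, hs']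
      rw [h0, PySem.List.foldl_congr_mem _ _ _ _ hcong, ih (r + 1) (c + 1) (w0 ++ [ch])]
      rw [wordN, hc]
      rcases wordN grid n (r + 1) (c + 1) with _ | w <;> simp



-- A's contribution of row t, in row-major order
def rowPairs (grid : List String) (pat rev : List Char) (L : Nat) (t : Nat) : List (Int × Int) :=
  ((List.range ((grid.getD t "").length)).filter
      (fun c => Pm grid pat rev L ((t : Nat) : Int) ((c : Nat) : Int))).map
    (fun c => (((t : Nat) : Int), ((c : Nat) : Int)))

theorem A_eq (grid : List String) (search : String) :
    diagonal_search grid search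
      = (List.range grid.length).flatMap
          (rowPairs grid search.toList search.toList.reverse search.length) := by
  unfold diagonal_search
  rw [PySem.Str.slice?_none_none_neg_one]
  simp only [Option.getD_some, String.toList_ofList, PySem.List.pyRange_zero_natCast,
    List.foldl_map, PySem.List.pyGetD_natCast]
  rw [PySem.List.foldl_congr_mem _ _
      (fun acc t => acc ++ rowPairs grid search.toList search.toList.reverse search.length t) _ ?_]
  · rw [PySem.List.foldl_append_eq_flatMap]
    simp
  · intro acc t _
    simp only
    rw [PySem.List.foldl_congr_mem _ _
        (fun acc c => if Pm grid search.toList search.toList.reverse search.length ((t : Nat) : Int) ((c : Nat) : Int)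
          then acc ++ [(((t : Nat) : Int), ((c : Nat) : Int))] else acc) _ ?_]
    · rw [PySem.List.foldl_append_if]
      rfl
    · intro acc2 c _
      simp only
      rw [wordA_eq grid search.length ((t : Nat) : Int) ((c : Nat) : Int) []]
      unfold Pm
      rcases wordN grid search.length ((t : Nat) : Int) ((c : Nat) : Int) with _ | w <;> simp


theorem cell_valid (grid : List String) (d : Int) (t : Nat) (h : bValid grid d t = true) :
    cell? grid ((t : Nat) : Int) (((t : Nat) : Int) + d) = some (bChar grid d t) := by
  have ht : t < grid.length := lt_of_bValid grid d t h
  unfold bValid at h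
  simp only [Bool.and_eq_true, decide_eq_true_eq] at h
  obtain ⟨h0, hlt⟩ := h
  unfold cell?
  rw [PySem.List.pyGet?_natCast, List.getElem?_eq_getElem ht]
  have hrow : grid.getD t "" = grid[t] := List.getD_eq_getElem grid "" ht
  rw [hrow] at hlt
  simp only [Option.bind_some]
  have hc : ((t : Int) + d) = (((((t : Int) + d).toNat) : Nat) : Int) := by omega
  rw [hc, PySem.Str.pyGet?_natCast]
  have hcl : ((t : Int) + d).toNat < (grid[t].toList).length := by
    rw [String.length_toList]; omega
  rw [List.getElem?_eq_getElem hcl]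
  unfold bChar
  rw [hrow, List.getD_eq_getElem _ _ hcl]

theorem cell_invalid (grid : List String) (d : Int) (t : Nat) (h0 : 0 ≤ (t : Int) + d)
    (h : bValid grid d t = false) : cell? grid ((t : Nat) : Int) (((t : Nat) : Int) + d) = none := by
  unfold cell?
  rw [PySem.List.pyGet?_natCast]
  by_cases ht : t < grid.length
  · rw [List.getElem?_eq_getElem ht]
    unfold bValid at h
    simp only [Bool.and_eq_false_iff, decide_eq_false_iff_not] at h
    have hge : ¬ ((t : Int) + d < ((grid.getD t "").length : Int)) := by
      rcases h with h | h
      · exact absurd h0 h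
      · exact h
    have hrow : grid.getD t "" = grid[t] := List.getD_eq_getElem grid "" ht
    rw [hrow] at hge
    have hc : ((t : Int) + d) = (((((t : Int) + d).toNat) : Nat) : Int) := by omega
    rw [Option.bind_eq_none_iff]
    intro row hr
    rw [Option.some_inj] at hr
    subst hr
    rw [hc, PySem.Str.pyGet?_natCast]
    rw [List.getElem?_eq_none_iff]
    rw [String.length_toList]
    omega
  · rw [List.getElem?_eq_none_iff.mpr (by omega)]
    rfl

theorem wordN_valid (grid : List String) (d : Int) (n : Nat) :
    ∀ (r : Nat), (∀ k < n, bValid grid d (r + k) = true) →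
    wordN grid n ((r : Nat) : Int) (((r : Nat) : Int) + d)
      = some ((List.range n).map (fun k => bChar grid d (r + k))) := by
  induction n with
  | zero => intro r _; simp [wordN]
  | succ n ih =>
    intro r hv
    rw [wordN]
    have h0 : bValid grid d r = true := by simpa using hv 0 (by omega)
    rw [cell_valid grid d r h0]
    have hsh1 : ((r : Nat) : Int) + 1 = (((r + 1 : Nat) : Nat) : Int) := by push_cast; ring
    have hsh2 : ((r : Nat) : Int) + d + 1 = (((r + 1 : Nat) : Nat) : Int) + d := by push_cast; ring
    rw [hsh1, hsh2, ih (r + 1) (fun k hk => by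
      have h1 := hv (k + 1) (by omega)
      have e : r + (k + 1) = r + 1 + k := by omega
      rwa [e] at h1)]
    simp only [Option.bind_some, Option.map_some]
    have hmap : (List.range (n + 1)).map (fun k => bChar grid d (r + k))
        = bChar grid d r :: (List.range n).map (fun k => bChar grid d (r + 1 + k)) := by
      rw [List.range_succ_eq_map]
      simp only [List.map_cons, List.map_map, Nat.add_zero]
      congr 1
      apply List.map_congr_left
      intro k _
      simp only [Function.comp_apply]
      congr 1
      omega
    rw [hmap]

theorem wordN_none (grid : List String) (n : Nat) :
    ∀ (r c : Int) (i0 : Nat), i0 < n → cell? grid (r + (i0 : Int)) (c + (i0 : Int)) = none →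
    wordN grid n r c = none := by
  induction n with
  | zero => intro r c i0 h; omega
  | succ n ih =>
    intro r c i0 hi hc
    rw [wordN]
    rcases hi0 : i0 with _ | j
    · subst hi0
      simp only [Nat.cast_zero, add_zero] at hc
      rw [hc]
      rfl
    · subst hi0
      have hc' : cell? grid ((r + 1) + (j : Int)) ((c + 1) + (j : Int)) = none := by
        have e1 : (r + 1) + (j : Int) = r + ((j + 1 : Nat) : Int) := by push_cast; ring
        have e2 : (c + 1) + (j : Int) = c + ((j + 1 : Nat) : Int) := by push_cast; ring
        rw [e1, e2]; exact hc
      rw [ih (r + 1) (c + 1) j (by omega) hc']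
      rcases cell? grid r c with _ | ch <;> rfl


def push (rows : List (List Int)) (t : Nat) (v : Int) : List (List Int) :=
  rows.set t (rows.getD t [] ++ [v])

def stepT (grid : List String) (pat rev : List Char) (L : Nat) (d : Int)
    (rows : List (List Int)) (t : Nat) : List (List Int) :=
  if bValid grid d t && Pm grid pat rev L ((t : Nat) : Int) (((t : Nat) : Int) + d)
  then push rows t (((t : Nat) : Int) + d) else rows

theorem slice_run (grid : List String) (d : Int) (r0 m j L : Nat) (hjm : j < m) (hLm : j + L ≤ m) :
    PySem.Chars.slice ((List.range m).map (fun k => bChar grid d (r0 + k)))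
        (some (j : Int)) (some ((j : Int) + (L : Int)))
      = (List.range L).map (fun k => bChar grid d (r0 + (j + k))) := by
  rw [PySem.Chars.slice_eq_listSlice, PySem.List.slice_natCast_add]
  apply List.ext_getElem
  · simp
    omega
  · intro i h1 h2
    simp only [List.getElem_take, List.getElem_drop, List.getElem_map, List.getElem_range]

theorem slice_run_len (grid : List String) (d : Int) (r0 m j L : Nat) (hLm : m < j + L) :
    (PySem.Chars.slice ((List.range m).map (fun k => bChar grid d (r0 + k)))
        (some (j : Int)) (some ((j : Int) + (L : Int)))).length = m - j := by
  rw [PySem.Chars.slice_eq_listSlice, PySem.List.slice_natCast_add]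
  simp
  omega

theorem run_cond (grid : List String) (pat rev : List Char) (L : Nat) (d : Int) (r0 m : Nat)
    (hL : pat.length = L) (hrev : rev.length = L)
    (hv : ∀ k < m, bValid grid d (r0 + k) = true)
    (hmax : bValid grid d (r0 + m) = false)
    (j : Nat) (hj : j < m) :
    (PySem.Chars.slice ((List.range m).map (fun k => bChar grid d (r0 + k)))
        (some (j : Int)) (some ((j : Int) + (L : Int))) = pat
      ∨ PySem.Chars.slice ((List.range m).map (fun k => bChar grid d (r0 + k)))
        (some (j : Int)) (some ((j : Int) + (L : Int))) = rev)
    ↔ Pm grid pat rev L ((r0 + j : Nat) : Int) (((r0 + j : Nat) : Int) + d) = true := by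
  by_cases hcase : j + L ≤ m
  · rw [slice_run grid d r0 m j L hj hcase]
    have hw := wordN_valid grid d L (r0 + j) (fun k hk => by
      have := hv (j + k) (by omega)
      have e : r0 + (j + k) = r0 + j + k := by omega
      rwa [e] at this)
    unfold Pm
    rw [hw]
    have e : ∀ k, r0 + j + k = r0 + (j + k) := by omega
    simp only [decide_eq_true_eq]
    constructor
    · intro h
      rcases h with h | h
      · left; rw [← h]; apply List.map_congr_left; intro k _; rw [e k]
      · right; rw [← h]; apply List.map_congr_left; intro k _; rw [e k]
    · intro h
      rcases h with h | h
      · left; rw [← h]; apply List.map_congr_left; intro k _; rw [e k]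
      · right; rw [← h]; apply List.map_congr_left; intro k _; rw [e k]
  · have hlen := slice_run_len grid d r0 m j L (by omega)
    have hne1 : PySem.Chars.slice ((List.range m).map (fun k => bChar grid d (r0 + k)))
        (some (j : Int)) (some ((j : Int) + (L : Int))) ≠ pat := by
      intro h; rw [h, hL] at hlen; omega
    have hne2 : PySem.Chars.slice ((List.range m).map (fun k => bChar grid d (r0 + k)))
        (some (j : Int)) (some ((j : Int) + (L : Int))) ≠ rev := by
      intro h; rw [h, hrev] at hlen; omega
    have hnone : wordN grid L ((r0 + j : Nat) : Int) (((r0 + j : Nat) : Int) + d) = none := by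
      apply wordN_none grid L _ _ (m - j) (by omega)
      have h0 : (0 : Int) ≤ (r0 : Int) + d := by
        have := hv 0 (by omega)
        unfold bValid at this
        simp only [Nat.add_zero, Bool.and_eq_true, decide_eq_true_eq] at this
        exact this.1
      have e1 : ((r0 + j : Nat) : Int) + ((m - j : Nat) : Int) = ((r0 + m : Nat) : Int) := by
        push_cast; omega
      have e2 : (((r0 + j : Nat) : Int) + d) + ((m - j : Nat) : Int) = ((r0 + m : Nat) : Int) + d := by
        push_cast; omega
      rw [e1, e2]
      exact cell_invalid grid d (r0 + m) (by push_cast at h0 ⊢; omega) hmax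
    unfold Pm
    rw [hnone]
    simp only [PySem.Chars.slice_eq_listSlice] at hne1 hne2
    simp [hne1, hne2]

theorem bScan_eq (grid : List String) (pat rev : List Char) (L : Nat) (d : Int) (r0 m : Nat)
    (rows : List (List Int)) (hL : pat.length = L) (hrev : rev.length = L)
    (hv : ∀ k < m, bValid grid d (r0 + k) = true)
    (hmax : bValid grid d (r0 + m) = false) :
    bScan pat rev L d r0 ((List.range m).map (fun k => bChar grid d (r0 + k))) rows
      = (List.range' r0 m).foldl (stepT grid pat rev L d) rows := by
  unfold bScan
  rw [List.length_map, List.length_range, List.range'_eq_map_range, List.foldl_map]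
  apply PySem.List.foldl_congr_mem
  intro acc j hj
  have hjm : j < m := List.mem_range.mp hj
  have hcond := run_cond grid pat rev L d r0 m hL hrev hv hmax j hjm
  simp only
  unfold stepT
  have hvt : bValid grid d (r0 + j) = true := hv j hjm
  by_cases hs : PySem.Chars.slice ((List.range m).map (fun k => bChar grid d (r0 + k)))
      (some (j : Int)) (some ((j : Int) + (L : Int))) = pat
    ∨ PySem.Chars.slice ((List.range m).map (fun k => bChar grid d (r0 + k)))
      (some (j : Int)) (some ((j : Int) + (L : Int))) = rev
  · rw [if_pos hs, hvt, hcond.mp hs]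
    simp only [Bool.and_self, if_pos]
    unfold push
    have e : ((r0 : Int)) + (j : Int) + d = ((r0 + j : Nat) : Int) + d := by push_cast; ring
    rw [e]
  · rw [if_neg hs]
    have : Pm grid pat rev L ((r0 + j : Nat) : Int) (((r0 + j : Nat) : Int) + d) = false := by
      rcases hPm : Pm grid pat rev L ((r0 + j : Nat) : Int) (((r0 + j : Nat) : Int) + d) with _ | _
      · rfl
      · exact absurd (hcond.mpr hPm) hs
    rw [this]
    simp

theorem bSeglen_le (grid : List String) (d : Int) (r : Nat) :
    bSeglen grid d r ≤ grid.length - r := by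
  unfold bSeglen
  have := (List.takeWhile_prefix (l := List.range (grid.length - r))
    (fun k => bValid grid d (r + k))).length_le
  simpa using this

theorem takeWhile_stop {α : Type} (p : α → Bool) (l : List α)
    (h : (l.takeWhile p).length < l.length) :
    p (l[(l.takeWhile p).length]'h) = false := by
  induction l with
  | nil => simp at h
  | cons x xs ih =>
    by_cases hx : p x = true
    · have htw : List.takeWhile p (x :: xs) = x :: xs.takeWhile p := by
        rw [List.takeWhile_cons, if_pos hx]
      simp only [htw, List.length_cons] at h ⊢
      have h' : (xs.takeWhile p).length < xs.length := by simpa using h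
      simpa using ih h'
    · have htw : List.takeWhile p (x :: xs) = [] := by
        rw [List.takeWhile_cons, if_neg hx]
      simp only [htw, List.length_nil, List.getElem_cons_zero]
      exact Bool.not_eq_true _ ▸ (by simpa using hx)

theorem bSeglen_valid (grid : List String) (d : Int) (r k : Nat) (hk : k < bSeglen grid d r) :
    bValid grid d (r + k) = true := by
  unfold bSeglen at hk
  have hpre := List.takeWhile_prefix (l := List.range (grid.length - r))
    (fun k => bValid grid d (r + k))
  have htake := List.prefix_iff_eq_take.mp hpre
  have hkl : k < (List.range (grid.length - r)).length := lt_of_lt_of_le hk hpre.length_le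
  have hq : ((List.range (grid.length - r)).takeWhile (fun k => bValid grid d (r + k)))[k]? = some k := by
    rw [htake, List.getElem?_take, if_pos hk, List.getElem?_range (by simpa using hkl)]
  have hres := List.mem_takeWhile_imp (List.mem_of_getElem? hq)
  simpa using hres

theorem bSeglen_max (grid : List String) (d : Int) (r : Nat)
    (h : bSeglen grid d r < grid.length - r) :
    bValid grid d (r + bSeglen grid d r) = false := by
  have h' : ((List.range (grid.length - r)).takeWhile (fun k => bValid grid d (r + k))).length
      < (List.range (grid.length - r)).length := by
    simpa using h
  have := takeWhile_stop (fun k => bValid grid d (r + k)) (List.range (grid.length - r)) h'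
  rwa [List.getElem_range] at this



theorem bWalk_eq (grid : List String) (pat rev : List Char) (L : Nat) (d : Int)
    (hL : pat.length = L) (hrev : rev.length = L) (hi : Nat)
    (hcap : ∀ t : Nat, bValid grid d t = true → t < hi) :
    ∀ (fuel r : Nat) (rows : List (List Int)), hi - r ≤ fuel →
    bWalk grid pat rev L d hi r rows
      = (List.range' r (hi - r)).foldl (stepT grid pat rev L d) rows := by
  intro fuel
  induction fuel with
  | zero =>
    intro r rows h
    rw [bWalk, dif_neg (by omega : ¬ r < hi)]
    rw [show hi - r = 0 by omega]
    rfl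
  | succ fuel ih =>
    intro r rows h
    rw [bWalk]
    by_cases hr : r < hi
    · rw [dif_pos hr]
      by_cases hv : bValid grid d r = true
      · rw [dif_pos hv]
        have hrlen : r < grid.length := lt_of_bValid grid d r hv
        have hm1 : 0 < bSeglen grid d r := bSeglen_pos grid d r hrlen hv
        have hval : ∀ k < bSeglen grid d r, bValid grid d (r + k) = true :=
          fun k hk => bSeglen_valid grid d r k hk
        have hmle : r + bSeglen grid d r ≤ hi := by
          have := hcap (r + (bSeglen grid d r - 1)) (hval _ (by omega))
          omega
        have hmax : bValid grid d (r + bSeglen grid d r) = false := by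
          have hle := bSeglen_le grid d r
          by_cases hcase : bSeglen grid d r < grid.length - r
          · exact bSeglen_max grid d r hcase
          · exact bValid_of_ge grid d (r + bSeglen grid d r) (by omega)
        show bWalk grid pat rev L d hi (r + bSeglen grid d r)
            (bScan pat rev L d r ((List.range (bSeglen grid d r)).map (fun k => bChar grid d (r + k))) rows)
            = List.foldl (stepT grid pat rev L d) rows (List.range' r (hi - r))
        rw [bScan_eq grid pat rev L d r (bSeglen grid d r) rows hL hrev hval hmax]
        rw [ih (r + bSeglen grid d r) _ (by omega)]
        have e := List.range'_append (s := r) (m := bSeglen grid d r)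
          (n := hi - (r + bSeglen grid d r)) (step := 1)
        simp only [one_mul] at e
        rw [show hi - r
            = bSeglen grid d r + (hi - (r + bSeglen grid d r)) by omega, ← e]
        rw [List.foldl_append]
      · rw [dif_neg hv]
        rw [ih (r + 1) rows (by omega)]
        have hstep : List.range' r (hi - r)
            = r :: List.range' (r + 1) (hi - (r + 1)) := by
          rw [show hi - r = (hi - (r + 1)) + 1 by omega, List.range'_succ]
        rw [hstep, List.foldl_cons]
        have hvf : bValid grid d r = false := by simpa using hv
        have hid : stepT grid pat rev L d rows r = rows := by
          unfold stepT
          rw [hvf]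
          simp
        rw [hid]
    · rw [dif_neg hr]
      rw [show hi - r = 0 by omega]
      rfl

theorem foldl_stepT_id (grid : List String) (pat rev : List Char) (L : Nat) (d : Int)
    (ts : List Nat) (h : ∀ t ∈ ts, bValid grid d t = false) :
    ∀ (rows : List (List Int)), ts.foldl (stepT grid pat rev L d) rows = rows := by
  induction ts with
  | nil => intro rows; rfl
  | cons t ts ih =>
    intro rows
    rw [List.foldl_cons]
    have hid : stepT grid pat rev L d rows t = rows := by
      unfold stepT
      rw [h t (by simp)]
      simp
    rw [hid]
    exact ih (fun t' ht' => h t' (by simp [ht'])) rows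

theorem getD_stepT (grid : List String) (pat rev : List Char) (L : Nat) (d : Int)
    (rows : List (List Int)) (t : Nat) (ht : t < rows.length) (t' : Nat) :
    (stepT grid pat rev L d rows t').getD t []
      = rows.getD t [] ++
        (if t' = t ∧ (bValid grid d t' && Pm grid pat rev L ((t' : Nat) : Int) (((t' : Nat) : Int) + d)) = true
         then [((t' : Nat) : Int) + d] else []) := by
  unfold stepT
  by_cases hc : (bValid grid d t' && Pm grid pat rev L ((t' : Nat) : Int) (((t' : Nat) : Int) + d)) = true
  · rw [if_pos hc]
    by_cases he : t' = t
    · subst he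
      rw [if_pos ⟨rfl, hc⟩]
      unfold push
      rw [List.getD_eq_getElem?_getD, List.getElem?_set_self ht]
      rfl
    · rw [if_neg (by tauto)]
      unfold push
      rw [List.getD_eq_getElem?_getD, List.getElem?_set_ne (by omega), ← List.getD_eq_getElem?_getD]
      simp
  · rw [if_neg hc, if_neg (by tauto)]
    simp

theorem length_stepT (grid : List String) (pat rev : List Char) (L : Nat) (d : Int)
    (rows : List (List Int)) (t' : Nat) :
    (stepT grid pat rev L d rows t').length = rows.length := by
  unfold stepT push
  split
  · rw [List.length_set]
  · rfl

theorem foldl_stepT_getD (grid : List String) (pat rev : List Char) (L : Nat) (d : Int)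
    (ts : List Nat) :
    ∀ (rows : List (List Int)) (t : Nat), t < rows.length →
    ((ts.foldl (stepT grid pat rev L d) rows).getD t [])
      = rows.getD t [] ++
        ((ts.filter (fun t' => decide (t' = t)
            && (bValid grid d t' && Pm grid pat rev L ((t' : Nat) : Int) (((t' : Nat) : Int) + d)))).map
          (fun t' => ((t' : Nat) : Int) + d)) := by
  induction ts with
  | nil => intro rows t ht; simp
  | cons t' ts ih =>
    intro rows t ht
    rw [List.foldl_cons]
    rw [ih _ t (by rw [length_stepT]; exact ht)]
    rw [getD_stepT grid pat rev L d rows t ht t']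
    rw [List.filter_cons]
    by_cases he : t' = t
    · subst he
      by_cases hc : (bValid grid d t' && Pm grid pat rev L ((t' : Nat) : Int) (((t' : Nat) : Int) + d)) = true
      · rw [if_pos ⟨rfl, hc⟩]
        simp [hc]
      · rw [if_neg (by tauto)]
        simp [hc]
    · rw [if_neg (by tauto)]
      simp [he]

theorem length_foldl_stepT (grid : List String) (pat rev : List Char) (L : Nat) (d : Int)
    (ts : List Nat) :
    ∀ (rows : List (List Int)), (ts.foldl (stepT grid pat rev L d) rows).length = rows.length := by
  induction ts with
  | nil => intro rows; rfl
  | cons t' ts ih => intro rows; rw [List.foldl_cons, ih, length_stepT]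

theorem filter_range_self (n t : Nat) (ht : t < n) (C : Nat → Bool) :
    (List.range n).filter (fun t' => decide (t' = t) && C t') = if C t then [t] else [] := by
  induction n with
  | zero => omega
  | succ n ih =>
    rw [List.range_succ, List.filter_append]
    by_cases he : t < n
    · rw [ih he]
      have hne : n ≠ t := by omega
      have : (List.filter (fun t' => decide (t' = t) && C t') [n]) = [] := by
        simp [hne]
      rw [this, List.append_nil]
    · have htn : t = n := by omega
      subst htn
      have h1 : (List.range t).filter (fun t' => decide (t' = t) && C t') = [] := by
        rw [List.filter_eq_nil_iff]
        intro a ha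
        have : a < t := List.mem_range.mp ha
        simp only [Bool.and_eq_true, decide_eq_true_eq, not_and]
        intro he
        omega
      rw [h1, List.nil_append]
      have hd : (decide (t = t) && C t) = C t := by simp
      rw [List.filter_cons, List.filter_nil, hd]

theorem diags_getD (grid : List String) (pat rev : List Char) (L : Nat) (ds : List Int) :
    ∀ (rows : List (List Int)) (t : Nat), rows.length = grid.length → t < grid.length →
    ((ds.foldl (fun rows d => (List.range' 0 grid.length).foldl (stepT grid pat rev L d) rows) rows).getD t [])
      = rows.getD t [] ++
        ((ds.filter (fun d => bValid grid d t && Pm grid pat rev L ((t : Nat) : Int) (((t : Nat) : Int) + d))).map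
          (fun d => ((t : Nat) : Int) + d)) := by
  induction ds with
  | nil => intro rows t _ _; simp
  | cons d ds ih =>
    intro rows t hlen ht
    rw [List.foldl_cons]
    rw [ih _ t (by rw [length_foldl_stepT]; exact hlen) ht]
    rw [foldl_stepT_getD grid pat rev L d (List.range' 0 grid.length) rows t (by omega)]
    rw [← List.range_eq_range', filter_range_self grid.length t ht]
    rw [List.filter_cons]
    by_cases hc : (bValid grid d t && Pm grid pat rev L ((t : Nat) : Int) (((t : Nat) : Int) + d)) = true
    · rw [if_pos hc]
      simp [hc]
    · rw [if_neg (by simpa using hc)]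
      simp [hc]

theorem init_le_foldl_max : ∀ (grid : List String) (init : Nat),
    init ≤ grid.foldl (fun m row => if row.length > m then row.length else m) init := by
  intro grid
  induction grid with
  | nil => intro init; simp
  | cons x xs ih =>
    intro init
    rw [List.foldl_cons]
    refine le_trans ?_ (ih _)
    split <;> omega

theorem le_foldl_maxw : ∀ (grid : List String) (init : Nat) (row : String), row ∈ grid →
    row.length ≤ grid.foldl (fun m row => if row.length > m then row.length else m) init := by
  intro grid
  induction grid with
  | nil => intro init row h; simp at h
  | cons x xs ih =>
    intro init row h
    rw [List.foldl_cons]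
    rcases List.mem_cons.mp h with h | h
    · subst h
      refine le_trans ?_ (init_le_foldl_max xs _)
      split <;> omega
    · exact ih _ row h


theorem row_eq (grid : List String) (pat rev : List Char) (L : Nat) (t : Nat) (ht : t < grid.length)
    (maxw : Nat) (hw : (grid.getD t "").length ≤ maxw) :
    ((PySem.List.pyRange (1 - (grid.length : Int)) (maxw : Int) 1).filter
        (fun d => bValid grid d t && Pm grid pat rev L ((t : Nat) : Int) (((t : Nat) : Int) + d))).map
      (fun d => ((t : Nat) : Int) + d)
    = ((List.range ((grid.getD t "").length)).filter
        (fun c => Pm grid pat rev L ((t : Nat) : Int) ((c : Nat) : Int))).map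
      (fun c => ((c : Nat) : Int)) := by
  have h1 : (1 : Int) - (grid.length : Int) ≤ -(t : Int) := by omega
  have h2 : -(t : Int) ≤ ((grid.getD t "").length : Int) - (t : Int) := by omega
  have h3 : ((grid.getD t "").length : Int) - (t : Int) ≤ (maxw : Int) := by omega
  rw [PySem.List.pyRange_one_append _ (-(t : Int)) _ h1 (le_trans h2 h3)]
  rw [PySem.List.pyRange_one_append (-(t : Int)) (((grid.getD t "").length : Int) - (t : Int)) _ h2 h3]
  rw [List.filter_append, List.filter_append, List.map_append, List.map_append]
  have hnil1 : (PySem.List.pyRange (1 - (grid.length : Int)) (-(t : Int)) 1).filter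
      (fun d => bValid grid d t && Pm grid pat rev L ((t : Nat) : Int) (((t : Nat) : Int) + d)) = [] := by
    rw [List.filter_eq_nil_iff]
    intro d hd
    have hdlt : d < -(t : Int) := (PySem.List.mem_pyRange_one.mp hd).2
    have hbv : bValid grid d t = false := by
      unfold bValid
      have hno : ¬ ((0 : Int) ≤ (t : Int) + d) := by omega
      simp only [Bool.and_eq_false_iff, decide_eq_false_iff_not]
      left; exact hno
    simp [hbv]
  have hnil2 : (PySem.List.pyRange (((grid.getD t "").length : Int) - (t : Int)) (maxw : Int) 1).filter
      (fun d => bValid grid d t && Pm grid pat rev L ((t : Nat) : Int) (((t : Nat) : Int) + d)) = [] := by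
    rw [List.filter_eq_nil_iff]
    intro d hd
    have hdge : ((grid.getD t "").length : Int) - (t : Int) ≤ d := (PySem.List.mem_pyRange_one.mp hd).1
    have hbv : bValid grid d t = false := by
      unfold bValid
      have hno : ¬ ((t : Int) + d < ((grid.getD t "").length : Int)) := by omega
      simp only [Bool.and_eq_false_iff, decide_eq_false_iff_not]
      right; exact hno
    simp [hbv]
  rw [hnil1, hnil2]
  simp only [List.map_nil, List.nil_append, List.append_nil]
  have hmid : PySem.List.pyRange (-(t : Int)) (((grid.getD t "").length : Int) - (t : Int)) 1
      = (List.range ((grid.getD t "").length)).map (fun (k : Nat) => -(t : Int) + ((k : Nat) : Int)) := by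
    rw [PySem.List.pyRange_one]
    rw [show (((grid.getD t "").length : Int) - (t : Int) - (-(t : Int))).toNat
        = (grid.getD t "").length by omega]
  rw [hmid, List.filter_map, List.map_map]
  have hfc : List.filter ((fun d => bValid grid d t
        && Pm grid pat rev L ((t : Nat) : Int) (((t : Nat) : Int) + d)) ∘ (fun (k : Nat) => -(t : Int) + ((k : Nat) : Int)))
        (List.range ((grid.getD t "").length))
      = List.filter (fun c => Pm grid pat rev L ((t : Nat) : Int) ((c : Nat) : Int))
        (List.range ((grid.getD t "").length)) := by
    apply List.filter_congr
    intro k hk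
    have hkW : k < (grid.getD t "").length := List.mem_range.mp hk
    simp only [Function.comp_apply]
    have e : ((t : Nat) : Int) + (-(t : Int) + (k : Int)) = ((k : Nat) : Int) := by ring
    unfold bValid
    rw [e]
    have hb1 : decide ((0 : Int) ≤ (k : Int)) = true := by simp
    have hb2 : decide ((k : Int) < ((grid.getD t "").length : Int)) = true := by
      simp only [decide_eq_true_eq]
      exact_mod_cast hkW
    rw [hb1, hb2]
    simp
  rw [hfc]
  apply List.map_congr_left
  intro k _
  simp only [Function.comp_apply]
  ring

theorem B_eq (grid : List String) (search : String) :
    diagonal_search_alt grid search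
      = (List.range grid.length).flatMap
          (rowPairs grid search.toList search.toList.reverse search.length) := by
  unfold diagonal_search_alt
  rw [PySem.Str.slice?_none_none_neg_one]
  simp only [Option.getD_some, String.toList_ofList]
  have hL : (search.toList).length = search.length := String.length_toList
  have hrev : (search.toList.reverse).length = search.length := by
    rw [List.length_reverse]; exact hL
  have hmw : ∀ row ∈ grid, row.length
      ≤ grid.foldl (fun m row => if row.length > m then row.length else m) 0 :=
    fun row hr => le_foldl_maxw grid 0 row hr
  rw [PySem.List.foldl_congr_mem _ _
      (fun rows d => (List.range' 0 grid.length).foldl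
        (stepT grid search.toList search.toList.reverse search.length d) rows) _
      (by
        intro rows d hd
        obtain ⟨hd1, hd2⟩ := PySem.List.mem_pyRange_one.mp hd
        show bWalk grid search.toList search.toList.reverse search.length d
            (min grid.length
              (((grid.foldl (fun m row => if row.length > m then row.length else m) 0 : Nat) : Int) - d).toNat)
            (if d < 0 then (-d).toNat else 0) rows
          = (List.range' 0 grid.length).foldl
              (stepT grid search.toList search.toList.reverse search.length d) rows
        set mw := grid.foldl (fun m row => if row.length > m then row.length else m) 0 with hmwdef
        set lo := (if d < 0 then (-d).toNat else 0 : Nat) with hlodef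
        set hi := min grid.length (((mw : Nat) : Int) - d).toNat with hhidef
        have hcap : ∀ t : Nat, bValid grid d t = true → t < hi := by
          intro t htv
          have htlen : t < grid.length := lt_of_bValid grid d t htv
          have hcv : (t : Int) + d < ((grid.getD t "").length : Int) := by
            unfold bValid at htv
            simp only [Bool.and_eq_true, decide_eq_true_eq] at htv
            exact htv.2
          have hle : (grid.getD t "").length ≤ mw := by
            apply hmw
            rw [List.getD_eq_getElem grid "" htlen]
            exact List.getElem_mem htlen
          omega
        rw [bWalk_eq grid search.toList search.toList.reverse search.length d hL hrev hi hcap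
          (hi - lo) lo rows (by omega)]
        have hlole : lo ≤ hi := by
          rw [hlodef, hhidef]
          split_ifs with hdn
          · omega
          · omega
        have hhile : hi ≤ grid.length := by rw [hhidef]; omega
        have e1 := List.range'_append (s := 0) (m := lo) (n := hi - lo) (step := 1)
        simp only [one_mul, Nat.zero_add] at e1
        rw [show lo + (hi - lo) = hi from by omega] at e1
        have e2 := List.range'_append (s := 0) (m := hi) (n := grid.length - hi) (step := 1)
        simp only [one_mul, Nat.zero_add] at e2
        rw [show hi + (grid.length - hi) = grid.length from by omega] at e2
        have pref : ∀ t ∈ List.range' 0 lo, bValid grid d t = false := by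
          intro t ht
          have htlo : t < lo := by
            have := List.mem_range'_1.mp ht
            omega
          have hdneg : (t : Int) + d < 0 := by
            rw [hlodef] at htlo
            by_cases hdn : d < 0
            · rw [if_pos hdn] at htlo; omega
            · rw [if_neg hdn] at htlo; omega
          unfold bValid
          simp only [Bool.and_eq_false_iff, decide_eq_false_iff_not]
          left; omega
        have suf : ∀ t ∈ List.range' hi (grid.length - hi), bValid grid d t = false := by
          intro t ht
          have h1 := List.mem_range'_1.mp ht
          have htlen : t < grid.length := by omega
          have h2 : hi ≤ t := h1.1
          rw [hhidef] at h2
          have hXt : (((mw : Nat) : Int) - d).toNat ≤ t := by omega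
          have hle : (grid.getD t "").length ≤ mw := by
            apply hmw
            rw [List.getD_eq_getElem grid "" htlen]
            exact List.getElem_mem htlen
          unfold bValid
          simp only [Bool.and_eq_false_iff, decide_eq_false_iff_not]
          right; omega
        rw [← e2, ← e1, List.foldl_append, List.foldl_append]
        rw [foldl_stepT_id grid search.toList search.toList.reverse search.length d
          (List.range' 0 lo) pref rows]
        rw [foldl_stepT_id grid search.toList search.toList.reverse search.length d
          (List.range' hi (grid.length - hi)) suf])]
  rw [List.flatMap_def, List.flatMap_def]
  congr 1
  apply List.map_congr_left
  intro t ht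
  have htl : t < grid.length := List.mem_range.mp ht
  rw [diags_getD grid search.toList search.toList.reverse search.length _
    (List.replicate grid.length []) t (by rw [List.length_replicate]) htl]
  rw [List.getD_replicate _ htl, List.nil_append]
  have hmem : grid.getD t "" ∈ grid := by
    rw [List.getD_eq_getElem grid "" htl]
    exact List.getElem_mem htl
  rw [row_eq grid search.toList search.toList.reverse search.length t htl _
    (le_foldl_maxw grid 0 (grid.getD t "") hmem)]
  unfold rowPairs
  rw [List.map_map]
  rfl

-- ===== VERDICT (by name: the statement is the Claim_ definition above) =====
theorem diagonal_search_spec : Claim_equal_diagonal_search := by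
  intro grid search _
  unfold Spec_diagonal_search
  rw [A_eq, B_eq]
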